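-- pv_equiv track=rewrite | github.com/oliver-nce/FMP_Sync | fmp_sync/utils/schema_mirror.py | _find_cache_table_entry
-- ===== SOURCE A (Python) =====
-- def _find_cache_table_entry(tables, table_name):
-- 	"""Match FM Tables table_name to a cache row (table_name / base_table_name, case-insensitive)."""
-- 	if not table_name or not tables:
-- 		return None
-- 	want = table_name.strip()
-- 	want_lower = want.lower()
-- 	for t in tables:
-- 		tn = (t.get("table_name") or "").strip()
-- 		if tn == want:
-- 			return t
-- 	for t in tables:
-- 		tn = (t.get("table_name") or "").strip()
-- 		if tn.lower() == want_lower: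
-- 			return t
-- 	for t in tables:
-- 		bn = (t.get("base_table_name") or "").strip()
-- 		if bn == want:
-- 			return t
-- 	for t in tables:
-- 		bn = (t.get("base_table_name") or "").strip()
-- 		if bn.lower() == want_lower:
-- 			return t
-- 	return None
-- ===== SOURCE B (Python) =====
-- def _find_cache_table_entry(tables, table_name):
--     """Single pass: score each row 1-4 (exact/ci table_name, exact/ci base_table_name), keep the first row with the smallest score."""
--     if not table_name or not tables:
--         return None
--     want = table_name.strip()
--     want_lower = want.lower()
--     best = None
--     best_priority = 5
--     for t in tables:
--         tn = (t.get("table_name") or "").strip()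
--         bn = (t.get("base_table_name") or "").strip()
--         if tn == want:
--             p = 1
--         elif tn.lower() == want_lower:
--             p = 2
--         elif bn == want:
--             p = 3
--         elif bn.lower() == want_lower:
--             p = 4
--         else:
--             continue
--         if p < best_priority:
--             best_priority = p
--             best = t
--     return best
-- ===== Notes on version B (the rewrite author's own statement) =====
-- stated objective: alternative
-- what changed: A scans the table list up to four times (exact table_name, case-insensitive table_name, exact base_table_name, case-insensitive base_table_name); B makes a single pass that scores each row 1-4 and keeps the first row with the strictly smallest score.
import Mathlib
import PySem

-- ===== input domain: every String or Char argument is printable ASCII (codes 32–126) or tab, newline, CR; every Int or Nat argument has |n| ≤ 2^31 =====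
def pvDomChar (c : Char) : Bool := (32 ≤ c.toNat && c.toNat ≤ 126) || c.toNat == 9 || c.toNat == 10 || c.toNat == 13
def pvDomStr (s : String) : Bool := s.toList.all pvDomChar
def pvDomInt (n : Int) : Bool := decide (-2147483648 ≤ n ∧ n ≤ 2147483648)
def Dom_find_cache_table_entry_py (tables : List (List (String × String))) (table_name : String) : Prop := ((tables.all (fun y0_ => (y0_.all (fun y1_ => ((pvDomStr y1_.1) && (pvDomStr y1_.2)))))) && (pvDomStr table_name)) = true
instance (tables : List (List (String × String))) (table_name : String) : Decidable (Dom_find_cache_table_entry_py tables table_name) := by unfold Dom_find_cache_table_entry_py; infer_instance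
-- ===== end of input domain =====

-- B replaces A's four sequential scans of `tables` by one pass that scores each row 1–4 and keeps the first row with the strictly smallest score (objective: alternative, single traversal instead of up to four).


-- ===== PORT A =====
-- (t.get("table_name") or "").strip(); `v or ""` on a string is v itself when v ≠ "" and "" otherwise,
-- so it equals the lookup with default "" exactly (dict.get = first match in the association list).
def pvTN (t : List (String × String)) : String := PySem.Str.strip ((t.lookup "table_name").getD "")
def pvBN (t : List (String × String)) : String := PySem.Str.strip ((t.lookup "base_table_name").getD "")

-- the four for-loops of A, each an early-returning scan
def pvLoop1 (want : String) : List (List (String × String)) → Option (List (String × String))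
  | [] => none
  | t :: rest => if pvTN t = want then some t else pvLoop1 want rest
def pvLoop2 (wl : String) : List (List (String × String)) → Option (List (String × String))
  | [] => none
  | t :: rest => if PySem.Str.lower (pvTN t) = wl then some t else pvLoop2 wl rest
def pvLoop3 (want : String) : List (List (String × String)) → Option (List (String × String))
  | [] => none
  | t :: rest => if pvBN t = want then some t else pvLoop3 want rest
def pvLoop4 (wl : String) : List (List (String × String)) → Option (List (String × String))
  | [] => none
  | t :: rest => if PySem.Str.lower (pvBN t) = wl then some t else pvLoop4 wl rest

def find_cache_table_entry_py (tables : List (List (String × String))) (table_name : String) : Option (List (String × String)) :=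
  if table_name = "" ∨ tables = [] then none
  else
    let want := PySem.Str.strip table_name
    let want_lower := PySem.Str.lower want
    (pvLoop1 want tables).or ((pvLoop2 want_lower tables).or
      ((pvLoop3 want tables).or (pvLoop4 want_lower tables)))

-- ===== PORT B =====
-- priority of a row: 1 exact table_name, 2 ci table_name, 3 exact base_table_name, 4 ci base_table_name, 5 no match
def pvPrio (want wl : String) (t : List (String × String)) : Nat :=
  if pvTN t = want then 1
  else if PySem.Str.lower (pvTN t) = wl then 2
  else if pvBN t = want then 3
  else if PySem.Str.lower (pvBN t) = wl then 4
  else 5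

def find_cache_table_entry_py_alt (tables : List (List (String × String))) (table_name : String) : Option (List (String × String)) :=
  if table_name = "" ∨ tables = [] then none
  else
    let want := PySem.Str.strip table_name
    let want_lower := PySem.Str.lower want
    (tables.foldl (fun acc t =>
        let p := pvPrio want want_lower t
        if p < acc.1 then (p, some t) else acc) (5, (none : Option (List (String × String))))).2

-- ===== PRECONDITION & SPEC =====
def Spec_find_cache_table_entry_py (tables : List (List (String × String))) (table_name : String) (out : Option (List (String × String))) : Prop := out = find_cache_table_entry_py_alt tables table_name
instance (tables : List (List (String × String))) (table_name : String) (out : Option (List (String × String))) : Decidable (Spec_find_cache_table_entry_py tables table_name out) := by unfold Spec_find_cache_table_entry_py; infer_instance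

-- ===== CLAIM (what is proved, stated in full; the proofs are below) =====
def Claim_equal_find_cache_table_entry_py : Prop := ∀ (tables : List (List (String × String))) (table_name : String), Dom_find_cache_table_entry_py tables table_name → Spec_find_cache_table_entry_py tables table_name (find_cache_table_entry_py tables table_name)

-- ===== LEMMAS AND PROOFS =====

-- pvSel l bp = the first row of l attaining the minimum priority, among rows of priority < bp
def pvSel (want wl : String) : List (List (String × String)) → Nat → Option (List (String × String))
  | [], _ => none
  | t :: rest, bp =>
      if pvPrio want wl t < bp then (pvSel want wl rest (pvPrio want wl t)).or (some t)
      else pvSel want wl rest bp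

-- the chain of A's loops, cut off at priority bound bp
def pvGdef (want wl : String) (l : List (List (String × String))) (bp : Nat) : Option (List (String × String)) :=
  (if 1 < bp then pvLoop1 want l else none).or
    ((if 2 < bp then pvLoop2 wl l else none).or
      ((if 3 < bp then pvLoop3 want l else none).or
        (if 4 < bp then pvLoop4 wl l else none)))

theorem pvFold_eq_sel (want wl : String) (l : List (List (String × String)))
    (bp : Nat) (bt : Option (List (String × String))) :
    (l.foldl (fun acc t =>
        let p := pvPrio want wl t
        if p < acc.1 then (p, some t) else acc) (bp, bt)).2
      = (pvSel want wl l bp).or bt := by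
  induction l generalizing bp bt with
  | nil => simp [pvSel]
  | cons t rest ih =>
    simp only [List.foldl_cons, pvSel]
    by_cases h : pvPrio want wl t < bp
    · simp [h, ih, Option.or_assoc, Option.some_or]
    · simp [h, ih]

theorem pvSel_eq_Gdef (want wl : String) (l : List (List (String × String))) (bp : Nat)
    (hbp : bp ≤ 5) :
    pvSel want wl l bp = pvGdef want wl l bp := by
  induction l generalizing bp with
  | nil => simp [pvSel, pvGdef, pvLoop1, pvLoop2, pvLoop3, pvLoop4]
  | cons t rest ih =>
    have ihbp := ih bp hbp
    by_cases c1 : pvTN t = want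
    · have hp : pvPrio want wl t = 1 := by simp [pvPrio, c1]
      have ih1 := ih 1 (by omega)
      by_cases h1 : 1 < bp
      · simp [pvSel, pvGdef, pvLoop1, hp, h1, ih1, c1]
      · have h2 : ¬ 2 < bp := by omega
        have h3 : ¬ 3 < bp := by omega
        have h4 : ¬ 4 < bp := by omega
        simp [pvSel, pvGdef, hp, h1, h2, h3, h4, ihbp]
    · by_cases c2 : PySem.Str.lower (pvTN t) = wl
      · have hp : pvPrio want wl t = 2 := by simp [pvPrio, c1, c2]
        have ih2 := ih 2 (by omega)
        by_cases h2 : 2 < bp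
        · have h1 : 1 < bp := by omega
          simp [pvSel, pvGdef, pvLoop1, pvLoop2, hp, h1, h2, ih2, c1, c2, Option.or_assoc]
        · have h3 : ¬ 3 < bp := by omega
          have h4 : ¬ 4 < bp := by omega
          by_cases h1 : 1 < bp <;>
            simp [pvSel, pvGdef, pvLoop1, hp, h1, h2, h3, h4, ihbp, c1]
      · by_cases c3 : pvBN t = want
        · have hp : pvPrio want wl t = 3 := by simp [pvPrio, c1, c2, c3]
          have ih3 := ih 3 (by omega)
          by_cases h3 : 3 < bp
          · have h1 : 1 < bp := by omega
            have h2 : 2 < bp := by omega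
            simp [pvSel, pvGdef, pvLoop1, pvLoop2, pvLoop3, hp, h1, h2, h3, ih3, c1, c2, c3,
              Option.or_assoc]
          · have h4 : ¬ 4 < bp := by omega
            by_cases h1 : 1 < bp <;> by_cases h2 : 2 < bp <;>
              simp [pvSel, pvGdef, pvLoop1, pvLoop2, hp, h1, h2, h3, h4, ihbp, c1, c2]
        · by_cases c4 : PySem.Str.lower (pvBN t) = wl
          · have hp : pvPrio want wl t = 4 := by simp [pvPrio, c1, c2, c3, c4]
            have ih4 := ih 4 (by omega)
            by_cases h4 : 4 < bp
            · have h1 : 1 < bp := by omega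
              have h2 : 2 < bp := by omega
              have h3 : 3 < bp := by omega
              simp [pvSel, pvGdef, pvLoop1, pvLoop2, pvLoop3, pvLoop4, hp, h1, h2, h3, h4, ih4,
                c1, c2, c3, c4, Option.or_assoc]
            · by_cases h1 : 1 < bp <;> by_cases h2 : 2 < bp <;> by_cases h3 : 3 < bp <;>
                simp [pvSel, pvGdef, pvLoop1, pvLoop2, pvLoop3, hp, h1, h2, h3, h4, ihbp,
                  c1, c2, c3]
          · have hp : pvPrio want wl t = 5 := by simp [pvPrio, c1, c2, c3, c4]
            have h5 : ¬ 5 < bp := by omega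
            by_cases h1 : 1 < bp <;> by_cases h2 : 2 < bp <;> by_cases h3 : 3 < bp <;>
              by_cases h4 : 4 < bp <;>
              simp [pvSel, pvGdef, pvLoop1, pvLoop2, pvLoop3, pvLoop4, hp, h1, h2, h3, h4, h5,
                ihbp, c1, c2, c3, c4]

-- ===== VERDICT (by name: the statement is the Claim_ definition above) =====
theorem find_cache_table_entry_py_spec : Claim_equal_find_cache_table_entry_py := by
  intro tables table_name _
  unfold Spec_find_cache_table_entry_py find_cache_table_entry_py find_cache_table_entry_py_alt
  by_cases hg : table_name = "" ∨ tables = []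
  · simp [hg]
  · simp only [hg]
    rw [pvFold_eq_sel, pvSel_eq_Gdef _ _ _ _ (by omega)]
    simp [pvGdef]
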